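-- pv_equiv track=rewrite | github.com/johnnyw66/cc1101_experiments | c1101.py | split_frames
-- ===== SOURCE A (Python) =====
-- SYNC_GAP_US = 5000
--
-- def split_frames(runs):
--     frames=[]
--     cur=[]
--     for dur,lvl in runs:
--         if lvl==0 and dur>=SYNC_GAP_US:
--             if cur: frames.append(cur); cur=[]
--             continue
--         cur.append((dur,lvl))
--     if cur: frames.append(cur)
--     return frames
-- ===== SOURCE B (Python) =====
-- SYNC_GAP_US = 5000
--
-- def split_frames(runs):
--     n = len(runs)
--     cuts = [i for i, (dur, lvl) in enumerate(runs) if lvl == 0 and dur >= SYNC_GAP_US]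
--     bounds = [-1] + cuts + [n]
--     return [runs[a + 1:b] for a, b in zip(bounds, bounds[1:]) if b - a > 1]
-- ===== Notes on version B (the rewrite author's own statement) =====
-- stated objective: alternative
-- what changed: Replaced A's single pass with an element-by-element accumulator and flush-on-delimiter logic by two staged passes: first collect the indices of sync-gap rows, then slice the input between consecutive boundary indices, keeping the non-trivial slices.
import Mathlib
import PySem

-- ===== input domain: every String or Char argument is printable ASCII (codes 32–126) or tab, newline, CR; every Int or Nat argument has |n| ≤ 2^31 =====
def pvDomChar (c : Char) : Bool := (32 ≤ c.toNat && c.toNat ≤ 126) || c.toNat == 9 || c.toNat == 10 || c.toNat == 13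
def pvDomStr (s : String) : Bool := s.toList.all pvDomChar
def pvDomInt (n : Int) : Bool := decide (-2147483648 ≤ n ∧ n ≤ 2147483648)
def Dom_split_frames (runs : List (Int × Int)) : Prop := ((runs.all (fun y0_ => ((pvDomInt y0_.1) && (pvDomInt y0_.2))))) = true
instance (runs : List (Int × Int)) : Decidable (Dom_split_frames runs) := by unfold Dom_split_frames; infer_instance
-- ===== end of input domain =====

-- B replaces A's per-element accumulator/flush loop by two staged passes: first collect the
-- indices of sync-gap rows, then slice the input between consecutive boundary indices (alternative).

-- the sync-gap predicate  lvl == 0 and dur >= SYNC_GAP_US  (shared text of both Pythons)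
def pvSync (r : Int × Int) : Bool := r.2 == 0 && decide (r.1 ≥ 5000)

-- ===== PORT A =====
-- the loop body of A: state = (frames, cur)
def pvStepA (st : List (List (Int × Int)) × List (Int × Int)) (r : Int × Int) :
    List (List (Int × Int)) × List (Int × Int) :=
  if pvSync r then
    (if st.2 ≠ [] then (st.1 ++ [st.2], ([] : List (Int × Int))) else (st.1, []))
  else (st.1, st.2 ++ [r])

def split_frames (runs : List (Int × Int)) : List (List (Int × Int)) :=
  let st := runs.foldl pvStepA ([], [])
  if st.2 ≠ [] then st.1 ++ [st.2] else st.1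

-- ===== PORT B =====
-- pass 1: cuts = [i for i,(dur,lvl) in enumerate(runs) if lvl==0 and dur>=SYNC_GAP_US]
-- pass 2: bounds = [-1]+cuts+[n];  [runs[a+1:b] for a,b in zip(bounds,bounds[1:]) if b-a>1]
def split_frames_alt (runs : List (Int × Int)) : List (List (Int × Int)) :=
  let n : Int := runs.length
  let cuts : List Int := ((PySem.List.enumerate runs).filter (fun p => pvSync p.2)).map (·.1)
  let bounds : List Int := [-1] ++ cuts ++ [n]
  ((bounds.zip bounds.tail).filter (fun p => decide (p.2 - p.1 > 1))).map
    (fun p => PySem.List.slice runs (some (p.1 + 1)) (some p.2))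

-- ===== PRECONDITION & SPEC =====
def Spec_split_frames (runs : List (Int × Int)) (out : List (List (Int × Int))) : Prop := out = split_frames_alt runs
instance (runs : List (Int × Int)) (out : List (List (Int × Int))) : Decidable (Spec_split_frames runs out) := by unfold Spec_split_frames; infer_instance

-- ===== CLAIM (what is proved, stated in full; the proofs are below) =====
def Claim_equal_split_frames : Prop := ∀ (runs : List (Int × Int)), Dom_split_frames runs → Spec_split_frames runs (split_frames runs)

-- ===== LEMMAS AND PROOFS =====

-- reference splitter: recursion splitting at the first sync-gap row
def pvRec : List (Int × Int) → List (List (Int × Int))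
  | [] => []
  | r :: rs =>
    if pvSync r then pvRec rs
    else (r :: rs.takeWhile (fun x => !pvSync x)) :: pvRec (rs.dropWhile (fun x => !pvSync x))
termination_by xs => xs.length
decreasing_by
  · exact Nat.lt_succ_self _
  · exact Nat.lt_succ_of_le (List.length_dropWhile_le _ _)

-- A's run with a pending partial frame `cur`, expressed denotationally
def pvAltWith (cur : List (Int × Int)) : List (Int × Int) → List (List (Int × Int))
  | [] => if cur = [] then [] else [cur]
  | r :: rs =>
    if pvSync r then (if cur = [] then pvAltWith [] rs else cur :: pvAltWith [] rs)
    else pvAltWith (cur ++ [r]) rs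

theorem pvRec_nil : pvRec [] = [] := by rw [pvRec]

theorem pvRec_cons (r : Int × Int) (rs : List (Int × Int)) :
    pvRec (r :: rs)
      = if pvSync r then pvRec rs
        else (r :: rs.takeWhile (fun x => !pvSync x)) :: pvRec (rs.dropWhile (fun x => !pvSync x)) := by
  rw [pvRec]

theorem pvAltWith_spec (rs : List (Int × Int)) :
    pvAltWith [] rs = pvRec rs ∧
    ∀ cur : List (Int × Int), cur ≠ [] →
      pvAltWith cur rs
        = (cur ++ rs.takeWhile (fun x => !pvSync x))
            :: pvRec (rs.dropWhile (fun x => !pvSync x)) := by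
  induction rs with
  | nil =>
    refine ⟨by simp [pvAltWith, pvRec_nil], ?_⟩
    intro cur hc
    simp [pvAltWith, hc, pvRec_nil]
  | cons r rs ih =>
    obtain ⟨ih1, ih2⟩ := ih
    constructor
    · by_cases h : pvSync r = true
      · rw [pvAltWith]
        simp only [h, if_true]
        rw [ih1, pvRec_cons]
        simp [h]
      · rw [pvAltWith]
        simp only [h, Bool.false_eq_true, if_false]
        rw [show ([] : List (Int × Int)) ++ [r] = [r] from rfl, ih2 [r] (by simp)]
        rw [pvRec_cons]
        simp [h]
    · intro cur hc
      by_cases h : pvSync r = true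
      · rw [pvAltWith]
        simp only [h, if_true, hc, if_false, ih1]
        rw [List.takeWhile_cons_of_neg (by simp [h]), List.dropWhile_cons_of_neg (by simp [h])]
        rw [pvRec_cons]
        simp [h]
      · rw [pvAltWith]
        simp only [h, Bool.false_eq_true, if_false]
        rw [ih2 (cur ++ [r]) (by simp)]
        rw [List.takeWhile_cons_of_pos (by simp [h]), List.dropWhile_cons_of_pos (by simp [h])]
        simp

theorem foldl_stepA (runs : List (Int × Int)) :
    ∀ (frames : List (List (Int × Int))) (cur : List (Int × Int)),
      (let st := runs.foldl pvStepA (frames, cur)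
       if st.2 ≠ [] then st.1 ++ [st.2] else st.1) = frames ++ pvAltWith cur runs := by
  induction runs with
  | nil =>
    intro frames cur
    by_cases hc : cur = []
    · simp [hc, pvAltWith]
    · simp [hc, pvAltWith]
  | cons r rs ih =>
    intro frames cur
    simp only [List.foldl_cons]
    by_cases h : pvSync r = true
    · by_cases hc : cur = []
      · rw [show pvStepA (frames, cur) r = (frames, []) from by simp [pvStepA, h, hc]]
        rw [ih frames []]
        rw [pvAltWith]; simp [h, hc]
      · rw [show pvStepA (frames, cur) r = (frames ++ [cur], []) from by simp [pvStepA, h, hc]]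
        rw [ih (frames ++ [cur]) []]
        rw [pvAltWith]; simp [h, hc]
    · rw [show pvStepA (frames, cur) r = (frames, cur ++ [r]) from by simp [pvStepA, h]]
      rw [ih frames (cur ++ [r])]
      rw [pvAltWith]; simp [h]

-- ---- B side ----

-- cut indices of xs, counted from s
def pvCuts (xs : List (Int × Int)) (s : Int) : List Int :=
  ((PySem.List.enumerate xs s).filter (fun p => pvSync p.2)).map (·.1)

theorem pvCuts_nil (s : Int) : pvCuts [] s = [] := by
  simp [pvCuts, PySem.List.enumerate_nil]

theorem pvCuts_cons (x : Int × Int) (xs : List (Int × Int)) (s : Int) :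
    pvCuts (x :: xs) s = (if pvSync x then [s] else []) ++ pvCuts xs (s + 1) := by
  by_cases h : pvSync x = true <;> simp [pvCuts, PySem.List.enumerate_cons, h]

theorem pvCuts_nonneg (xs : List (Int × Int)) : ∀ (s : Int), ∀ c ∈ pvCuts xs s, s ≤ c := by
  induction xs with
  | nil => intro s c hc; rw [pvCuts_nil] at hc; cases hc
  | cons x xs ih =>
    intro s c hc
    rw [pvCuts_cons] at hc
    rcases List.mem_append.1 hc with h1 | h2
    · by_cases h : pvSync x = true
      · simp [h] at h1; omega
      · simp [h] at h1
    · have := ih (s + 1) c h2; omega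

theorem pvCuts_syncfree (xs : List (Int × Int)) (hx : ∀ x ∈ xs, pvSync x = false) :
    ∀ s, pvCuts xs s = [] := by
  induction xs with
  | nil => intro s; exact pvCuts_nil s
  | cons x xs ih =>
    intro s
    rw [pvCuts_cons]
    have h := hx x (by simp)
    simp only [h, Bool.false_eq_true, if_false, List.nil_append]
    exact ih (fun y hy => hx y (by simp [hy])) (s + 1)

-- decomposition at the first sync row
theorem pvCuts_split (v : List (Int × Int)) (s' : Int × Int) (hs : pvSync s' = true) :
    ∀ (u : List (Int × Int)), (∀ x ∈ u, pvSync x = false) → ∀ (t : Int),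
      pvCuts (u ++ s' :: v) t = (t + u.length) :: (pvCuts v 0).map (fun c => t + u.length + 1 + c) := by
  intro u
  induction u with
  | nil =>
    intro _ t
    rw [List.nil_append, pvCuts_cons]
    simp only [hs, if_true]
    have hshift : ∀ (ys : List (Int × Int)) (t : Int), pvCuts ys t = (pvCuts ys 0).map (fun c => t + c) := by
      intro ys
      induction ys with
      | nil => intro t; simp [pvCuts_nil]
      | cons y ys ihy =>
        intro t
        rw [pvCuts_cons, pvCuts_cons, ihy (t + 1), ihy (0 + 1)]
        by_cases h : pvSync y = true <;> simp [h, List.map_map]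
    rw [hshift v (t + 1)]
    simp only [List.length_nil, Nat.cast_zero, add_zero, List.singleton_append]
  | cons x u ihu =>
    intro hu t
    have hx := hu x (by simp)
    rw [List.cons_append, pvCuts_cons]
    simp only [hx, Bool.false_eq_true, if_false, List.nil_append]
    rw [ihu (fun y hy => hu y (by simp [hy])) (t + 1)]
    congr 1
    · simp only [List.length_cons]; push_cast; ring
    · apply List.map_congr_left; intro c _; simp only [List.length_cons]; push_cast; ring

-- the frame list obtained from a boundary list a :: cs ++ [n], recursively
def pvPipe (xs : List (Int × Int)) (a : Int) (cs : List Int) (n : Int) : List (List (Int × Int)) :=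
  match cs with
  | [] => if n - a > 1 then [PySem.List.slice xs (some (a + 1)) (some n)] else []
  | c :: cs' => (if c - a > 1 then [PySem.List.slice xs (some (a + 1)) (some c)] else []) ++ pvPipe xs c cs' n

theorem pipe_eq (xs : List (Int × Int)) :
    ∀ (cs : List Int) (a n : Int),
      ((((a :: (cs ++ [n])).zip (cs ++ [n])).filter (fun p => decide (p.2 - p.1 > 1))).map
        (fun p => PySem.List.slice xs (some (p.1 + 1)) (some p.2))) = pvPipe xs a cs n := by
  intro cs
  induction cs with
  | nil =>
    intro a n
    by_cases h : n - a > 1 <;> simp [pvPipe, h]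
  | cons c cs ih =>
    intro a n
    rw [List.cons_append, List.zip_cons_cons]
    by_cases h : c - a > 1 <;> simp [pvPipe, h, ih c n]

theorem alt_eq_pipe (runs : List (Int × Int)) :
    split_frames_alt runs = pvPipe runs (-1) (pvCuts runs 0) (runs.length) := by
  have hb : ([-1] ++ (((PySem.List.enumerate runs).filter (fun p => pvSync p.2)).map (·.1)) ++ [(runs.length : Int)])
      = (-1) :: ((pvCuts runs 0) ++ [(runs.length : Int)]) := by simp [pvCuts]
  unfold split_frames_alt
  dsimp only
  rw [hb, List.tail_cons]
  exact pipe_eq runs (pvCuts runs 0) (-1) runs.length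

-- slicing past a length-d prefix
theorem slice_shift (w v : List (Int × Int)) (p q : Int) (hp : 0 ≤ p) (hq : 0 ≤ q) :
    PySem.List.slice (w ++ v) (some (p + w.length)) (some (q + w.length)) = PySem.List.slice v (some p) (some q) := by
  rw [PySem.List.slice_toNat _ (by omega) (by omega), PySem.List.slice_toNat _ hp hq]
  have h1 : (p + (w.length : Int)).toNat = w.length + p.toNat := by omega
  have h2 : (q + (w.length : Int)).toNat - (p + (w.length : Int)).toNat = q.toNat - p.toNat := by omega
  rw [h2, h1, List.drop_append]
  rw [List.drop_eq_nil_of_le (by omega), List.nil_append, Nat.add_sub_cancel_left]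

theorem pipe_shift (w v : List (Int × Int)) :
    ∀ (cs : List Int) (a n : Int), -1 ≤ a → (∀ c ∈ cs, 0 ≤ c) → 0 ≤ n →
      pvPipe (w ++ v) (a + w.length) (cs.map (· + (w.length : Int))) (n + w.length) = pvPipe v a cs n := by
  intro cs
  induction cs with
  | nil =>
    intro a n ha _ hn
    simp only [List.map_nil, pvPipe]
    have : (n + (w.length : Int)) - (a + w.length) = n - a := by ring
    rw [this]
    by_cases h : n - a > 1
    · simp only [h, if_true]
      rw [show a + (w.length : Int) + 1 = (a + 1) + w.length from by ring,
          slice_shift w v (a + 1) n (by omega) hn]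
    · simp [h]
  | cons c cs ih =>
    intro a n ha hc hn
    have hc0 : 0 ≤ c := hc c (by simp)
    simp only [List.map_cons, pvPipe]
    have : (c + (w.length : Int)) - (a + w.length) = c - a := by ring
    rw [this, ih c n (by omega) (fun x hx => hc x (by simp [hx])) hn]
    by_cases h : c - a > 1
    · simp only [h, if_true]
      rw [show a + (w.length : Int) + 1 = (a + 1) + w.length from by ring,
          slice_shift w v (a + 1) c (by omega) hc0]
    · simp [h]

theorem pvRec_syncfree (xs : List (Int × Int)) (hx : ∀ x ∈ xs, pvSync x = false) :
    pvRec xs = if xs = [] then [] else [xs] := by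
  cases xs with
  | nil => simp [pvRec_nil]
  | cons x xs =>
    have h := hx x (by simp)
    rw [pvRec_cons]
    simp only [h, Bool.false_eq_true, if_false]
    have ht : xs.takeWhile (fun y => !pvSync y) = xs :=
      List.takeWhile_eq_self_iff.2 (fun y hy => by simp [hx y (by simp [hy])])
    have hd : xs.dropWhile (fun y => !pvSync y) = [] :=
      List.dropWhile_eq_nil_iff.2 (fun y hy => by simp [hx y (by simp [hy])])
    rw [ht, hd, pvRec_nil]
    simp

theorem pvRec_split (v : List (Int × Int)) (s' : Int × Int) (hs : pvSync s' = true) :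
    ∀ (u : List (Int × Int)), (∀ x ∈ u, pvSync x = false) →
      pvRec (u ++ s' :: v) = (if u = [] then [] else [u]) ++ pvRec v := by
  intro u
  induction u with
  | nil =>
    intro _
    rw [List.nil_append, pvRec_cons]
    simp [hs]
  | cons x u ihu =>
    intro hu
    have hx := hu x (by simp)
    rw [List.cons_append, pvRec_cons]
    simp only [hx, Bool.false_eq_true, if_false]
    have ht : (u ++ s' :: v).takeWhile (fun y => !pvSync y) = u := by
      rw [List.takeWhile_append]
      have h1 : u.takeWhile (fun y => !pvSync y) = u :=
        List.takeWhile_eq_self_iff.2 (fun y hy => by simp [hu y (by simp [hy])])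
      simp [h1, hs]
    have hd : (u ++ s' :: v).dropWhile (fun y => !pvSync y) = s' :: v := by
      rw [List.dropWhile_append]
      have h1 : u.dropWhile (fun y => !pvSync y) = [] :=
        List.dropWhile_eq_nil_iff.2 (fun y hy => by simp [hu y (by simp [hy])])
      simp [h1, hs]
    rw [ht, hd, pvRec_cons]
    simp [hs]

theorem pvSync_head_dropWhile :
    ∀ (xs : List (Int × Int)) {s' : Int × Int} {v : List (Int × Int)},
      xs.dropWhile (fun y => !pvSync y) = s' :: v → pvSync s' = true := by
  intro xs
  induction xs with
  | nil => intro s' v h; cases h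
  | cons a as ihx =>
    intro s' v h
    by_cases hp : pvSync a = true
    · rw [List.dropWhile_cons_of_neg (by simp [hp])] at h
      cases h; exact hp
    · rw [List.dropWhile_cons_of_pos (by simp [hp])] at h
      exact ihx h

theorem alt_eq_rec_aux : ∀ (N : Nat) (xs : List (Int × Int)), xs.length ≤ N →
    pvPipe xs (-1) (pvCuts xs 0) (xs.length) = pvRec xs := by
  intro N
  induction N with
  | zero =>
    intro xs h
    have : xs = [] := List.eq_nil_of_length_eq_zero (Nat.le_zero.1 h)
    subst this
    simp [pvCuts_nil, pvPipe, pvRec_nil]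
  | succ N ih =>
    intro xs hlen
    by_cases hall : ∀ x ∈ xs, pvSync x = false
    · rw [pvCuts_syncfree xs hall 0, pvRec_syncfree xs hall]
      cases xs with
      | nil => simp [pvPipe]
      | cons x xs =>
        simp only [pvPipe, List.length_cons]
        have hgt : ((x :: xs).length : Int) - (-1) > 1 := by
          simp only [List.length_cons]; push_cast; omega
        simp only [List.length_cons] at hgt
        rw [if_pos hgt, if_neg (by simp)]
        congr 1
        rw [show (-1 : Int) + 1 = ((0 : Nat) : Int) from by norm_num,
            PySem.List.slice_natCast]
        simp
    · push Not at hall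
      -- split xs at its first sync row
      set u := xs.takeWhile (fun y => !pvSync y) with hu_def
      have hrest : xs.dropWhile (fun y => !pvSync y) ≠ [] := by
        intro hnil
        obtain ⟨x, hx, hsx⟩ := hall
        have : ∀ y ∈ xs, (fun y => !pvSync y) y = true := List.dropWhile_eq_nil_iff.1 hnil
        have := this x hx
        simp at this
        exact hsx this
      obtain ⟨s', v, hsv⟩ : ∃ s' v, xs.dropWhile (fun y => !pvSync y) = s' :: v := by
        cases h : xs.dropWhile (fun y => !pvSync y) with
        | nil => exact absurd h hrest
        | cons a b => exact ⟨a, b, rfl⟩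
      have hxs : xs = u ++ s' :: v := by
        rw [hu_def, ← hsv, List.takeWhile_append_dropWhile]
      have hufree : ∀ x ∈ u, pvSync x = false := by
        intro x hx
        have := List.mem_takeWhile_imp (hu_def ▸ hx)
        simpa using this
      have hs : pvSync s' = true := pvSync_head_dropWhile xs hsv
      have hvlen : v.length ≤ N := by
        have : xs.length = u.length + 1 + v.length := by rw [hxs]; simp; omega
        omega
      rw [hxs, pvCuts_split v s' hs u hufree 0, pvRec_split v s' hs u hufree]
      simp only [zero_add]
      rw [pvPipe]
      have hfirst : (if ((u.length : Int)) - (-1) > 1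
            then [PySem.List.slice (u ++ s' :: v) (some ((-1 : Int) + 1)) (some (u.length : Int))] else [])
          = (if u = [] then [] else [u]) := by
        by_cases hu : u = []
        · simp [hu]
        · have hlu : 0 < u.length := List.length_pos_iff.2 hu
          rw [if_pos (by omega), if_neg hu]
          rw [show ((-1 : Int) + 1) = ((0 : Nat) : Int) from by norm_num,
              PySem.List.slice_natCast]
          simp
      have h := pipe_shift (u ++ [s']) v (pvCuts v 0) (-1) (v.length) (by omega)
        (pvCuts_nonneg v 0) (by omega)
      have hm : ((pvCuts v 0).map (fun c => ((u.length : Int)) + 1 + c))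
          = (pvCuts v 0).map (· + ((u ++ [s']).length : Int)) := by
        apply List.map_congr_left; intro c _
        simp only [List.length_append, List.length_cons, List.length_nil]
        push_cast; ring
      have ha : ((u.length : Int)) = -1 + ((u ++ [s']).length : Int) := by
        simp only [List.length_append, List.length_cons, List.length_nil]
        push_cast; ring
      have hn : (((u ++ s' :: v).length : Int)) = (v.length : Int) + ((u ++ [s']).length : Int) := by
        simp only [List.length_append, List.length_cons, List.length_nil]
        push_cast; ring
      have hw : u ++ s' :: v = (u ++ [s']) ++ v := by simp
      have hsecond : pvPipe (u ++ s' :: v) ((u.length : Int))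
            ((pvCuts v 0).map (fun c => ((u.length : Int)) + 1 + c)) (((u ++ s' :: v).length : Int))
          = pvRec v := by
        rw [hm, ha, hn, hw]
        exact h.trans (ih v hvlen)
      rw [hfirst, hsecond]

-- ===== VERDICT (by name: the statement is the Claim_ definition above) =====
theorem split_frames_spec : Claim_equal_split_frames := by
  intro runs _
  unfold Spec_split_frames split_frames
  have hA := foldl_stepA runs [] []
  simp only [List.nil_append] at hA
  rw [hA, (pvAltWith_spec runs).1, alt_eq_pipe runs,
      alt_eq_rec_aux runs.length runs (le_refl _)]
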